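-- pv_equiv track=rewrite | github.com/Simhadri1933/TCS_CODING_PRACTICE | 10_Meil_Nandi_Coding_Answers.py | changee_form_stirng
-- ===== SOURCE A (Python) =====
-- def changee_form_stirng(s):
--     result = ""
--     for i in range(len(s)):
--         if i % 2 == 0:
--             new_char = chr((ord(s[i]) - ord('a') + 2) % 26 + ord('a'))
--         else:
--             new_char = chr((ord(s[i]) - ord('a') - 1) % 26 + ord('a'))
--         result += new_char
--     return result
-- ===== SOURCE B (Python) =====
-- def changee_form_stirng(s):
--     ev = [chr((ord(c) - ord('a') + 2) % 26 + ord('a')) for c in s[::2]]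
--     od = [chr((ord(c) - ord('a') - 1) % 26 + ord('a')) for c in s[1::2]]
--     out = []
--     for e, o in zip(ev, od):
--         out.append(e)
--         out.append(o)
--     if len(od) < len(ev):
--         out.append(ev[-1])
--     return "".join(out)
-- ===== Notes on version B (the rewrite author's own statement) =====
-- stated objective: alternative
-- what changed: B splits the string into the even- and odd-indexed subsequences via slices, maps +2 / -1 mod 26 over each in its own pass, and interleaves the two transformed sequences, instead of A's single indexed loop with a parity test and repeated string concatenation.
import Mathlib
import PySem

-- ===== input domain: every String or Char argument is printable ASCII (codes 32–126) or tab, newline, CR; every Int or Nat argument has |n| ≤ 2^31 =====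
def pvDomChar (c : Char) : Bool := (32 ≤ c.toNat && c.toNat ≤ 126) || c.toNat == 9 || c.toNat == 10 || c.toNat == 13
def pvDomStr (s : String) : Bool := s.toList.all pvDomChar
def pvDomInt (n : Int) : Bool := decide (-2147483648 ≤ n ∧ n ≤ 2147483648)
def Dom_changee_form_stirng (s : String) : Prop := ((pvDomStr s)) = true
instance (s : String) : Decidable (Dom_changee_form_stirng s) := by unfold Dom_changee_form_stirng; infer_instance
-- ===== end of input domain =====

-- B interleaves two separately shifted parity subsequences instead of A's single indexed loop; objective: alternative decomposition.

-- ===== PORT A =====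
def changee_form_stirng (s : String) : String :=
  String.mk ((List.range s.toList.length).foldl (fun result i =>
    result ++ [if i % 2 == 0
      then Char.ofNat ((PySem.Int.mod (((s.toList.getD i ' ').toNat : Int) - 97 + 2) 26) + 97).toNat
      else Char.ofNat ((PySem.Int.mod (((s.toList.getD i ' ').toNat : Int) - 97 - 1) 26) + 97).toNat]) [])

-- ===== PORT B =====
def pvShiftF (c : Char) : Char := Char.ofNat ((PySem.Int.mod ((c.toNat : Int) - 97 + 2) 26) + 97).toNat
def pvShiftB (c : Char) : Char := Char.ofNat ((PySem.Int.mod ((c.toNat : Int) - 97 - 1) 26) + 97).toNat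
-- exact port of the extended slice xs[::2] (every second element from the front; xs[1::2] = pvEveryOther (xs.drop 1))
def pvEveryOther : List Char → List Char
  | [] => []
  | [a] => [a]
  | a :: _ :: t => a :: pvEveryOther t

def changee_form_stirng_alt (s : String) : String :=
  let ev := (pvEveryOther s.toList).map pvShiftF
  let od := (pvEveryOther (s.toList.drop 1)).map pvShiftB
  let out := (ev.zip od).foldl (fun acc p => acc ++ [p.1, p.2]) []
  let out := if od.length < ev.length then out ++ [PySem.List.pyGetD ev (-1) 'a'] else out
  String.mk out

-- ===== PRECONDITION & SPEC =====
def Spec_changee_form_stirng (s : String) (out : String) : Prop := out = changee_form_stirng_alt s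
instance (s : String) (out : String) : Decidable (Spec_changee_form_stirng s out) := by unfold Spec_changee_form_stirng; infer_instance

-- ===== CLAIM (what is proved, stated in full; the proofs are below) =====
def Claim_equal_changee_form_stirng : Prop := ∀ (s : String), Dom_changee_form_stirng s → Spec_changee_form_stirng s (changee_form_stirng s)

-- ===== LEMMAS AND PROOFS =====
-- the common two-at-a-time normal form both ports are reduced to
def pvCore : List Char → List Char
  | [] => []
  | [a] => [pvShiftF a]
  | a :: b :: t => pvShiftF a :: pvShiftB b :: pvCore t

lemma pvEveryOther_tail (b : Char) (t : List Char) :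
    pvEveryOther (b :: t) = b :: pvEveryOther (t.drop 1) := by
  cases t <;> rfl

lemma pvA_map_eq_core (l : List Char) :
    (List.range l.length).map (fun i => if i % 2 == 0
      then Char.ofNat ((PySem.Int.mod (((l.getD i ' ').toNat : Int) - 97 + 2) 26) + 97).toNat
      else Char.ofNat ((PySem.Int.mod (((l.getD i ' ').toNat : Int) - 97 - 1) 26) + 97).toNat)
    = pvCore l := by
  induction l using pvCore.induct with
  | case1 => simp [pvCore]
  | case2 a => simp [pvCore, List.range_succ, pvShiftF]
  | case3 a b t ih =>
      have hr : List.range (t.length + 1 + 1)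
          = 0 :: 1 :: (List.range t.length).map (fun i => i + 1 + 1) := by
        rw [List.range_succ_eq_map, List.range_succ_eq_map]
        simp [List.map_map, Function.comp]
      simp only [List.length_cons, hr, List.map_cons, List.map_map,
        show pvCore (a :: b :: t) = pvShiftF a :: pvShiftB b :: pvCore t from rfl,
        List.cons.injEq]
      refine ⟨by simp [pvShiftF], by simp [pvShiftB], ?_⟩
      rw [← ih]
      apply List.map_congr_left
      intro i _
      have hm : (i + 1 + 1) % 2 = i % 2 := by omega
      simp [Function.comp, hm, List.getD_cons_succ]

lemma pvA_eq_core (l : List Char) :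
    (List.range l.length).foldl (fun result i =>
      result ++ [if i % 2 == 0
        then Char.ofNat ((PySem.Int.mod (((l.getD i ' ').toNat : Int) - 97 + 2) 26) + 97).toNat
        else Char.ofNat ((PySem.Int.mod (((l.getD i ' ').toNat : Int) - 97 - 1) 26) + 97).toNat]) []
    = pvCore l := by
  rw [PySem.List.foldl_append_singleton_eq_map]
  simpa using pvA_map_eq_core l

lemma pvB_eq_core (l : List Char) :
    (if ((pvEveryOther (l.drop 1)).map pvShiftB).length < ((pvEveryOther l).map pvShiftF).length
     then (((pvEveryOther l).map pvShiftF).zip ((pvEveryOther (l.drop 1)).map pvShiftB)).foldl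
            (fun acc p => acc ++ [p.1, p.2]) [] ++ [PySem.List.pyGetD ((pvEveryOther l).map pvShiftF) (-1) 'a']
     else (((pvEveryOther l).map pvShiftF).zip ((pvEveryOther (l.drop 1)).map pvShiftB)).foldl
            (fun acc p => acc ++ [p.1, p.2]) [])
    = pvCore l := by
  induction l using pvCore.induct with
  | case1 => simp [pvEveryOther, pvCore]
  | case2 a => simp [pvEveryOther, pvCore, PySem.List.pyGetD, PySem.List.pyGet?_neg_one]
  | case3 a b t ih =>
      rw [show pvEveryOther (a :: b :: t) = a :: pvEveryOther t from rfl,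
          show (a :: b :: t).drop 1 = b :: t from rfl, pvEveryOther_tail]
      rw [PySem.List.foldl_append_eq_flatMap (g := fun p : Char × Char => [p.1, p.2])] at ih ⊢
      simp only [List.map_cons, List.zip_cons_cons, List.flatMap_cons, List.length_cons,
        add_lt_add_iff_right, List.nil_append] at ih ⊢
      rw [show pvCore (a :: b :: t) = pvShiftF a :: pvShiftB b :: pvCore t from rfl]
      by_cases h : ((pvEveryOther (t.drop 1)).map pvShiftB).length < ((pvEveryOther t).map pvShiftF).length
      · have hne : (pvEveryOther t).map pvShiftF ≠ [] := by
          intro hnil; rw [hnil] at h; simp at h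
        rw [if_pos h] at ih
        rw [if_pos h]
        simp only [PySem.List.pyGetD, PySem.List.pyGet?_neg_one] at ih ⊢
        obtain ⟨e, es, hev⟩ := List.exists_cons_of_ne_nil hne
        rw [hev] at ih ⊢
        rw [List.getLast?_cons_cons]
        rw [← ih]
        simp
      · rw [if_neg h] at ih
        rw [if_neg h, ← ih]
        simp

-- ===== VERDICT (by name: the statement is the Claim_ definition above) =====
theorem changee_form_stirng_spec : Claim_equal_changee_form_stirng := by
  intro s _
  unfold Spec_changee_form_stirng
  simp only [changee_form_stirng, changee_form_stirng_alt]
  rw [pvA_eq_core, pvB_eq_core]
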